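-- pv_equiv track=rewrite | github.com/4tie/pyside6 | tests/api/test_runs_router_properties.py | _is_valid_path_segment
-- ===== SOURCE A (Python) =====
-- def _is_valid_path_segment(s: str) -> bool:
--     """Return True if s is safe to embed as a URL path segment.
--
--     Rejects strings that contain characters which would be interpreted as
--     URL structure (e.g. '/', '?', '#') or non-printable ASCII bytes that
--     httpx rejects as invalid URLs.
--     """
--     if not s:
--         return False
--     # Reject path separators and query/fragment delimiters
--     if any(c in s for c in ("//", "?", "#", "\\")):
--         return False
--     # Reject non-printable ASCII (httpx raises InvalidURL for these)
--     if any(ord(c) < 0x20 or ord(c) == 0x7F for c in s):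
--         return False
--     return True
-- ===== SOURCE B (Python) =====
-- def _bad(c):
--     o = ord(c)
--     return c in '?#\\' or o < 0x20 or o == 0x7F
--
--
-- def _is_valid_path_segment(s: str) -> bool:
--     """Single left-to-right pass: reject forbidden/control characters and a
--     '/' immediately following another '/'; accept nonempty clean strings."""
--     prev = ''
--     for c in s:
--         if _bad(c) or (c == '/' and prev == '/'):
--             return False
--         prev = c
--     return s != ''
-- ===== Notes on version B (the rewrite author's own statement) =====
-- stated objective: alternative
-- what changed: A's three separate scans (a substring-containment test for each of the doubled slash, question mark, hash and backslash, plus a second full pass for control characters) are replaced by a single left-to-right pass that tracks the previous character to detect a slash immediately following another slash and checks all forbidden/control characters at once.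
import Mathlib
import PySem

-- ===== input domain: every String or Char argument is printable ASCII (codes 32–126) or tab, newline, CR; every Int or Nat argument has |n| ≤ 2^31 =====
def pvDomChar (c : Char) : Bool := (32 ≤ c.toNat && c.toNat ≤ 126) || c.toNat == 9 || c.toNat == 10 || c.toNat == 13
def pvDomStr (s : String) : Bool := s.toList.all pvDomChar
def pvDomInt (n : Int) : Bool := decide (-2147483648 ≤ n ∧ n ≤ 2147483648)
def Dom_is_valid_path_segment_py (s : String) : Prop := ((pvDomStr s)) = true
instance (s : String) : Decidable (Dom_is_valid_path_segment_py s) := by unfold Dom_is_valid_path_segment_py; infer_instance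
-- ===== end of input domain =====

-- B replaces A's three separate scans (substring tests and a control-character pass) by one
-- left-to-right pass tracking the previous character; objective: alternative single-pass form.

-- ===== PORT A =====
def is_valid_path_segment_py (s : String) : Bool :=
  if s.toList.isEmpty then false
  else if [("//" : String), "?", "#", "\\"].any (fun c => PySem.Str.isIn c s) then false
  else if s.toList.any (fun c => decide (c.toNat < 0x20) || decide (c.toNat = 0x7F)) then false
  else true

-- ===== PORT B =====
-- Python helper `_bad(c)`
def pvBad (c : Char) : Bool :=
  (c ∈ ['?', '#', '\\'] : Bool) || decide (c.toNat < 0x20) || decide (c.toNat = 0x7F)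

-- the `for c in s` loop with its early return; `prev : Option Char` models prev = '' / prev = c
def pvAltLoop : Option Char → List Char → Bool
  | _, [] => true
  | prev, c :: rest =>
    if pvBad c || (c == '/' && prev == some '/') then false
    else pvAltLoop (some c) rest

def is_valid_path_segment_py_alt (s : String) : Bool :=
  pvAltLoop none s.toList && !s.toList.isEmpty

-- ===== PRECONDITION & SPEC =====
def Spec_is_valid_path_segment_py (s : String) (out : Bool) : Prop := out = is_valid_path_segment_py_alt s
instance (s : String) (out : Bool) : Decidable (Spec_is_valid_path_segment_py s out) := by unfold Spec_is_valid_path_segment_py; infer_instance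

-- ===== CLAIM (what is proved, stated in full; the proofs are below) =====
def Claim_equal_is_valid_path_segment_py : Prop := ∀ (s : String), Dom_is_valid_path_segment_py s → Spec_is_valid_path_segment_py s (is_valid_path_segment_py s)

-- ===== LEMMAS AND PROOFS =====

lemma pv_singleton_prefix (x : Char) (l : List Char) : [x] <+: l ↔ l.head? = some x := by
  cases l with
  | nil => simp
  | cons h t => simp [List.cons_prefix_cons, eq_comm]

lemma pv_dd_cons (c : Char) (rest : List Char) :
    (['/', '/'] <:+: c :: rest) ↔ (c = '/' ∧ rest.head? = some '/') ∨ ['/', '/'] <:+: rest := by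
  rw [List.infix_cons_iff, List.cons_prefix_cons, pv_singleton_prefix]
  tauto

-- characterisation of B's loop: it fails exactly on a bad character, a '//' pair,
-- or a leading '/' continuing a '/' carried in from prev
lemma pvAltLoop_eq (cs : List Char) : ∀ p : Option Char,
    (pvAltLoop p cs = true)
      ↔ ¬ ((∃ c ∈ cs, pvBad c = true) ∨ ['/', '/'] <:+: cs ∨ (p = some '/' ∧ cs.head? = some '/')) := by
  induction cs with
  | nil => intro p; simp [pvAltLoop]
  | cons c rest ih =>
    intro p
    rw [pvAltLoop]
    by_cases h : (pvBad c || (c == '/' && p == some '/')) = true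
    · rw [if_pos h]
      simp only [Bool.or_eq_true, Bool.and_eq_true, beq_iff_eq] at h
      simp only [Bool.false_eq_true, false_iff, not_not]
      rcases h with h | ⟨hc, hp⟩
      · exact Or.inl ⟨c, List.mem_cons_self .., h⟩
      · exact Or.inr (Or.inr ⟨hp, by simp [hc]⟩)
    · rw [if_neg h]
      simp only [Bool.or_eq_true, Bool.and_eq_true, beq_iff_eq, not_or] at h
      simp only [not_and] at h
      rw [ih (some c)]
      simp only [List.mem_cons, pv_dd_cons, List.head?_cons]
      constructor
      · intro hgood hbad
        apply hgood
        rcases hbad with ⟨d, hd | hd, hbd⟩ | (⟨hc, hh⟩ | hds) | ⟨hp, hh⟩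
        · exact absurd (hd ▸ hbd) (by simp [h.1])
        · exact Or.inl ⟨d, hd, hbd⟩
        · exact Or.inr (Or.inr ⟨by simpa using hc, hh⟩)
        · exact Or.inr (Or.inl hds)
        · exact absurd (h.2 (by injection hh)) (fun hne => hne hp)
      · intro hgood hbad
        apply hgood
        rcases hbad with ⟨d, hd, hbd⟩ | hds | ⟨hc, hh⟩
        · exact Or.inl ⟨d, Or.inr hd, hbd⟩
        · exact Or.inr (Or.inl (Or.inr hds))
        · exact Or.inr (Or.inl (Or.inl ⟨by injection hc, hh⟩))

-- ===== VERDICT (by name: the statement is the Claim_ definition above) =====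
theorem is_valid_path_segment_py_spec : Claim_equal_is_valid_path_segment_py := by
  intro s _
  unfold Spec_is_valid_path_segment_py is_valid_path_segment_py is_valid_path_segment_py_alt
  rw [Bool.eq_iff_iff]
  simp only [Bool.and_eq_true, Bool.not_eq_true', pvAltLoop_eq]
  have hdd : PySem.Str.isIn "//" s = true ↔ ['/', '/'] <:+: s.toList :=
    PySem.Str.isIn_iff_infix "//" s
  have hq : PySem.Str.isIn "?" s = true ↔ '?' ∈ s.toList := by
    rw [PySem.Str.isIn_iff_infix]; exact List.singleton_infix_iff '?' s.toList
  have hh : PySem.Str.isIn "#" s = true ↔ '#' ∈ s.toList := by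
    rw [PySem.Str.isIn_iff_infix]; exact List.singleton_infix_iff '#' s.toList
  have hb : PySem.Str.isIn "\\" s = true ↔ '\\' ∈ s.toList := by
    rw [PySem.Str.isIn_iff_infix]; exact List.singleton_infix_iff '\\' s.toList
  simp only [List.any_cons, List.any_nil, Bool.or_eq_true] at *
  split_ifs with he ha hc
  · simp [he]
  · simp only [false_iff, not_and]
    intro hnx
    exfalso; apply hnx
    rcases ha with h | h | h | (h | h)
    · exact Or.inr (Or.inl (hdd.mp h))
    · exact Or.inl ⟨'?', hq.mp h, by decide⟩
    · exact Or.inl ⟨'#', hh.mp h, by decide⟩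
    · exact Or.inl ⟨'\\', hb.mp h, by decide⟩
    · cases h
  · simp only [false_iff, not_and]
    intro hnx
    exfalso; apply hnx
    obtain ⟨c, hcm, hcc⟩ := List.any_eq_true.mp hc
    exact Or.inl ⟨c, hcm, by simp only [pvBad, Bool.or_assoc, hcc, Bool.or_true]⟩
  · simp only [true_iff]
    simp only [not_or] at ha
    refine ⟨?_, by simpa [Bool.not_eq_true] using he⟩
    rintro (⟨c, hcm, hbc⟩ | hds | ⟨hnone, _⟩)
    · simp only [pvBad, Bool.or_eq_true, List.mem_cons, decide_eq_true_eq,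
        List.not_mem_nil, or_false] at hbc
      rcases hbc with ((h1 | h2 | h3) | hlt) | h7f
      · exact ha.2.1 (hq.mpr (h1 ▸ hcm))
      · exact ha.2.2.1 (hh.mpr (h2 ▸ hcm))
      · exact ha.2.2.2.1 (hb.mpr (h3 ▸ hcm))
      · exact hc (List.any_eq_true.mpr ⟨c, hcm, by simp [hlt]⟩)
      · exact hc (List.any_eq_true.mpr ⟨c, hcm, by simp [h7f]⟩)
    · exact ha.1 (hdd.mpr hds)
    · cases hnone
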